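-- pv_equiv track=rewrite | github.com/IsraelDalcin/PythonExercises | LVL2_ex1.py | easyline
-- ===== SOURCE A (Python) =====
-- import math
--
-- def easyline(n):
--     numero = 0
--     valor_final = 0
--     for i in range(n+1):
--         valor_ponto = (math.factorial(n)//(math.factorial(numero)*math.factorial(n-numero)))
--         valor_final += valor_ponto**2
--         numero += 1
--     return valor_final
-- ===== SOURCE B (Python) =====
-- def easyline(n):
--     # sum of C(n,k)^2 over k = C(2n,n): one multiplicative chain, no factorials
--     if n < 0:
--         return 0
--     r = 1
--     for i in range(n):
--         r = r * (n + i + 1) // (i + 1)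
--     return r
-- ===== Notes on version B (the rewrite author's own statement) =====
-- stated objective: faster
-- what changed: Replaces the factorial-per-term summation of C(n,k)^2 with the closed form C(2n,n) computed by a single exact multiplicative chain.
import Mathlib
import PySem

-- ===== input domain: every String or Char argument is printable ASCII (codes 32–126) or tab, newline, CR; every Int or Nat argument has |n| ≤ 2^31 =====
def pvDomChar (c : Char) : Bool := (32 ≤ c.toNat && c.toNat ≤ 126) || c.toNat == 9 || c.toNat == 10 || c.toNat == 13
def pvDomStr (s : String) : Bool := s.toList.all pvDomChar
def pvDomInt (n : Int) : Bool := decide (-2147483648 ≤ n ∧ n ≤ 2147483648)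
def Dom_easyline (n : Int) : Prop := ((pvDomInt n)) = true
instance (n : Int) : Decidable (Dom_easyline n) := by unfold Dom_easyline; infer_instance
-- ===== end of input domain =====

-- B computes the closed form C(2n,n) by one exact multiplicative chain instead of A's
-- per-term factorial quotients; measured asymptotically faster (O(n) vs O(n^2) multiplies).

-- ===== PORT A =====
-- math.factorial; exact for k ≥ 0 (A only calls it with nonnegative arguments)
def pyFact (k : Int) : Int := (k.toNat.factorial : Int)

def easyline (n : Int) : Int :=
  ((PySem.List.pyRange 0 (n + 1) 1).foldl
    (fun (st : Int × Int) _i =>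
      let valor_ponto := PySem.Int.floordiv (pyFact n) (pyFact st.1 * pyFact (n - st.1))
      (st.1 + 1, st.2 + valor_ponto ^ 2))
    (0, 0)).2

-- ===== PORT B =====
def easyline_alt (n : Int) : Int :=
  if n < 0 then 0
  else
    (PySem.List.pyRange 0 n 1).foldl
      (fun r i => PySem.Int.floordiv (r * (n + i + 1)) (i + 1)) 1

-- ===== PRECONDITION & SPEC =====
def Spec_easyline (n : Int) (out : Int) : Prop := out = easyline_alt n
instance (n : Int) (out : Int) : Decidable (Spec_easyline n out) := by unfold Spec_easyline; infer_instance

-- ===== CLAIM (what is proved, stated in full; the proofs are below) =====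
def Claim_equal_easyline : Prop := ∀ (n : Int), Dom_easyline n → Spec_easyline n (easyline n)

-- ===== LEMMAS AND PROOFS =====

-- A's loop computes the running pair (k, Σ_{j<k} C(n,j)²)
theorem easyline_loop (n : ℕ) : ∀ (k : ℕ), k ≤ n + 1 →
    ((List.range k).foldl
      (fun (st : Int × Int) (_i : ℕ) =>
        let vp := PySem.Int.floordiv (pyFact (n : Int)) (pyFact st.1 * pyFact ((n : Int) - st.1))
        (st.1 + 1, st.2 + vp ^ 2))
      (0, 0))
    = ((k : Int), ((∑ j ∈ Finset.range k, (n.choose j) ^ 2 : ℕ) : Int)) := by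
  intro k hk
  induction k with
  | zero => simp
  | succ k ih =>
    have hk' : k ≤ n := by omega
    rw [List.range_succ, List.foldl_append, ih (by omega)]
    have h1 : pyFact ((n : Int)) = (n.factorial : Int) := by
      simp [pyFact]
    have h2 : pyFact ((k : ℕ) : Int) = (k.factorial : Int) := by
      simp [pyFact]
    have h3 : ((n : Int) - (k : Int)) = ((n - k : ℕ) : Int) := by
      push_cast [Nat.cast_sub hk']; ring
    have h4 : pyFact ((n : Int) - (k : Int)) = ((n - k).factorial : Int) := by
      rw [h3]; simp [pyFact]
    have hdiv : PySem.Int.floordiv ((n.factorial : ℕ) : Int)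
        (((k.factorial * (n - k).factorial : ℕ) : Int)) = ((n.choose k : ℕ) : Int) := by
      rw [PySem.Int.floordiv_natCast]
      rw [← Nat.choose_eq_factorial_div_factorial hk']
    simp only [List.foldl_cons, List.foldl_nil]
    refine Prod.ext (by push_cast; ring) ?_
    simp only [h1, h2, h4]
    rw [show (k.factorial : Int) * ((n - k).factorial : Int)
        = ((k.factorial * (n - k).factorial : ℕ) : Int) by push_cast; ring, hdiv]
    rw [Finset.sum_range_succ]
    push_cast; ring

-- B's chain maintains r = C(n+k, k) after k steps
theorem alt_chain (n : ℕ) : ∀ (k : ℕ), k ≤ n →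
    (((List.range k).map (fun j => ((0 : Int) + (j : ℕ)))).foldl
      (fun r i => PySem.Int.floordiv (r * ((n : Int) + i + 1)) (i + 1)) 1)
    = (((n + k).choose k : ℕ) : Int) := by
  intro k hk
  induction k with
  | zero => simp
  | succ k ih =>
    rw [List.range_succ, List.map_append, List.foldl_append, ih (by omega)]
    simp only [List.map_cons, List.map_nil, List.foldl_cons, List.foldl_nil]
    have hstep : (n + k).choose k * (n + k + 1) = (n + k + 1).choose (k + 1) * (k + 1) := by
      rw [mul_comm]
      exact Nat.add_one_mul_choose_eq (n + k) k
    have hcast : (((n + k).choose k : ℕ) : Int) * ((n : Int) + ((0 : Int) + (k : ℕ)) + 1)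
        = (((n + k).choose k * (n + k + 1) : ℕ) : Int) := by push_cast; ring
    rw [hcast, show ((0 : Int) + (k : ℕ)) + 1 = (((k + 1 : ℕ) : Int)) by push_cast; ring,
      PySem.Int.floordiv_natCast, hstep, Nat.mul_div_cancel _ (by omega)]
    norm_num [Nat.add_assoc]

theorem easyline_eq_sum (n : ℕ) :
    easyline (n : Int) = ((∑ j ∈ Finset.range (n + 1), (n.choose j) ^ 2 : ℕ) : Int) := by
  unfold easyline
  rw [PySem.List.pyRange_one]
  have hlen : (((n : Int) + 1) - 0).toNat = n + 1 := by omega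
  rw [hlen]
  -- the fold ignores the list elements, so folding over the mapped range = folding over range
  rw [List.foldl_map]
  rw [easyline_loop n (n + 1) le_rfl]

theorem alt_eq_central (n : ℕ) :
    easyline_alt (n : Int) = (((2 * n).choose n : ℕ) : Int) := by
  unfold easyline_alt
  rw [if_neg (by exact not_lt.mpr (Int.natCast_nonneg n))]
  rw [PySem.List.pyRange_one]
  have hlen : ((n : Int) - 0).toNat = n := by omega
  rw [hlen, alt_chain n n le_rfl]
  congr 2
  omega

theorem easyline_neg (n : Int) (hn : n < 0) : easyline n = easyline_alt n := by
  unfold easyline easyline_alt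
  rw [if_pos hn, PySem.List.pyRange_one]
  have : ((n + 1) - 0).toNat = 0 := by omega
  rw [this]
  simp

-- ===== VERDICT (by name: the statement is the Claim_ definition above) =====
theorem easyline_spec : Claim_equal_easyline := by
  intro n _
  unfold Spec_easyline
  rcases lt_or_ge n 0 with hn | hn
  · exact easyline_neg n hn
  · obtain ⟨m, rfl⟩ : ∃ m : ℕ, n = (m : Int) := ⟨n.toNat, by omega⟩
    rw [easyline_eq_sum m, alt_eq_central m, Nat.sum_range_choose_sq]
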